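-- pv_equiv track=rewrite | github.com/elliscode/dumbphone-apps | lambda/dumbphoneapps-monolith/dumbphoneapps/food_diary.py | determine_tokens
-- ===== SOURCE A (Python) =====
-- def determine_tokens(food_id, food_name):
--     food_tokens = {}
--     food_key = food_name.lower()
--     split_food_key = food_key.split()
--     for i in range(0, len(split_food_key)):
--         food_token = ""
--         for j in range(i, len(split_food_key)):
--             if food_token:
--                 food_token += " "
--             food_token += split_food_key[j]
--         if food_token not in food_tokens:
--             food_tokens[food_token] = []
--         food_tokens[food_token].append({"hash": food_id, "name": food_name})
--     return food_tokens
-- ===== SOURCE B (Python) =====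
-- def determine_tokens(food_id, food_name):
--     words = food_name.lower().split()
--     suffix = ""
--     suffixes = []
--     for word in reversed(words):
--         suffix = word + " " + suffix if suffix else word
--         suffixes.append(suffix)
--     return {s: [{"hash": food_id, "name": food_name}] for s in reversed(suffixes)}
-- ===== Notes on version B (the rewrite author's own statement) =====
-- stated objective: simpler
-- what changed: Replaces A's nested loops (rebuilding each suffix string from scratch with an inner index loop) by a single backward pass that extends a running suffix accumulator, then builds the dict by a comprehension over the reversed suffix list.
import Mathlib
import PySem

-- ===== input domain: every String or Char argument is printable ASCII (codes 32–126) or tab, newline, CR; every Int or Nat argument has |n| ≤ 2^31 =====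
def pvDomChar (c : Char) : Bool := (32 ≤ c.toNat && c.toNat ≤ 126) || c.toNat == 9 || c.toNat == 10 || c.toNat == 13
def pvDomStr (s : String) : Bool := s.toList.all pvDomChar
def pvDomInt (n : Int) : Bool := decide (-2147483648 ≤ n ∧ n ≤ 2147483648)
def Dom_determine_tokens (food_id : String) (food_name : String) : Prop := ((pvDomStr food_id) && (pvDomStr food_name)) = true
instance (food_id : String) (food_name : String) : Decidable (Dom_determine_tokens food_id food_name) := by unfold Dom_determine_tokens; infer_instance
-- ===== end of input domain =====

-- B replaces A's nested suffix-rebuilding loops by one backward pass with a running suffix accumulator (objective: simpler).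


-- ===== PORT A =====
def determine_tokens (food_id : String) (food_name : String) : List (String × List (List (String × String))) :=
  let food_key := PySem.Str.lower food_name
  let split_food_key := PySem.Str.split₀ food_key
  let food_tokens :=
    (PySem.List.pyRange 0 (PySem.List.len split_food_key)).foldl (fun food_tokens i =>
      let food_token :=
        (PySem.List.pyRange i (PySem.List.len split_food_key)).foldl (fun food_token j =>
          let food_token := if food_token ≠ "" then food_token ++ " " else food_token
          -- split_food_key[j]: j ranges over valid indices, the "" default is unreachable
          food_token ++ PySem.List.pyGetD split_food_key j "") ""
      let food_tokens :=
        if food_tokens.contains food_token then food_tokens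
        else food_tokens.insert food_token []
      -- food_tokens[food_token].append(...): the key is present here, the [] default is unreachable
      food_tokens.insert food_token
        (food_tokens.getD food_token [] ++ [[("hash", food_id), ("name", food_name)]]))
      (PySem.Dict.empty : PySem.Dict String (List (List (String × String))))
  food_tokens.items

-- ===== PORT B =====
def determine_tokens_alt (food_id : String) (food_name : String) : List (String × List (List (String × String))) :=
  let words := PySem.Str.split₀ (PySem.Str.lower food_name)
  -- one backward pass: running accumulator `suffix`, collecting each suffix string
  let st := words.reverse.foldl
    (fun (st : String × List String) word =>
      let suffix := if st.1 ≠ "" then word ++ " " ++ st.1 else word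
      (suffix, st.2 ++ [suffix])) ("", [])
  -- {s: [entry] for s in reversed(suffixes)}
  (st.2.reverse.foldl
    (fun d s => d.insert s [[("hash", food_id), ("name", food_name)]])
    (PySem.Dict.empty : PySem.Dict String (List (List (String × String))))).items

-- ===== PRECONDITION & SPEC =====
def Spec_determine_tokens (food_id : String) (food_name : String) (out : List (String × List (List (String × String)))) : Prop := out = determine_tokens_alt food_id food_name
instance (food_id : String) (food_name : String) (out : List (String × List (List (String × String)))) : Decidable (Spec_determine_tokens food_id food_name out) := by unfold Spec_determine_tokens; infer_instance

-- ===== CLAIM (what is proved, stated in full; the proofs are below) =====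
def Claim_equal_determine_tokens : Prop := ∀ (food_id : String) (food_name : String), Dom_determine_tokens food_id food_name → Spec_determine_tokens food_id food_name (determine_tokens food_id food_name)

-- ===== LEMMAS AND PROOFS =====

-- A's inner-loop step:  token = (token + " " if token else token) + word
def pvF (t w : String) : String := (if t ≠ "" then t ++ " " else t) ++ w

-- B's accumulator step, as a function of the word list (suffix of the split): the space-join
def pvS : List String → String
  | [] => ""
  | w :: l => if pvS l ≠ "" then w ++ " " ++ pvS l else w

-- list of all suffix joins, longest first
def pvSL : List String → List String
  | [] => []
  | w :: l => pvS (w :: l) :: pvSL l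

-- B's pairs list before the final reversal
def pvBL : List String → List String
  | [] => []
  | w :: l => pvBL l ++ [pvS (w :: l)]

-- char-level picture of " " ++ w concatenated over l
def pvPL : List String → List Char
  | [] => []
  | w :: l => ' ' :: w.toList ++ pvPL l

theorem pvF_fold_toList (l : List String) : ∀ t : String, t ≠ "" →
    (l.foldl pvF t).toList = t.toList ++ pvPL l := by
  induction l with
  | nil => intro t _; simp [pvPL]
  | cons w l ih =>
    intro t ht
    have hstep : pvF t w = t ++ " " ++ w := by simp [pvF, ht]
    have hne : t ++ " " ++ w ≠ "" := by
      intro h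
      have h2 : (t ++ " " ++ w).toList = [] := by rw [h]; simp
      simp [String.toList_append] at h2
    calc ((w :: l).foldl pvF t).toList = (l.foldl pvF (t ++ " " ++ w)).toList := by
          simp [List.foldl_cons, hstep]
      _ = (t ++ " " ++ w).toList ++ pvPL l := ih _ hne
      _ = t.toList ++ pvPL (w :: l) := by simp [String.toList_append, pvPL]

theorem pvS_toList (w : String) (l : List String)
    (hw : w ≠ "") (hl : ∀ u ∈ l, u ≠ "") :
    (pvS (w :: l)).toList = w.toList ++ pvPL l := by
  induction l generalizing w with
  | nil => simp [pvS, pvPL]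
  | cons w' l ih =>
    have hw' : w' ≠ "" := hl w' (by simp)
    have hl' : ∀ u ∈ l, u ≠ "" := fun u hu => hl u (by simp [hu])
    have htl : (pvS (w' :: l)).toList = w'.toList ++ pvPL l := ih w' hw' hl'
    have hne : pvS (w' :: l) ≠ "" := by
      intro h
      rw [h] at htl
      have h0 : ([] : List Char) = w'.toList ++ pvPL l := by simpa using htl
      have hw0 : w'.toList = [] := (List.append_eq_nil_iff.mp h0.symm).1
      exact hw' (String.toList_eq_nil_iff.mp hw0)
    show (if pvS (w' :: l) ≠ "" then w ++ " " ++ pvS (w' :: l) else w).toList = _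
    rw [if_pos hne]
    simp [String.toList_append, htl, pvPL]

theorem pvJ_eq_pvS (l : List String) (h : ∀ u ∈ l, u ≠ "") :
    l.foldl pvF "" = pvS l := by
  cases l with
  | nil => rfl
  | cons w l =>
    have hw : w ≠ "" := h w (by simp)
    have hl : ∀ u ∈ l, u ≠ "" := fun u hu => h u (by simp [hu])
    apply String.toList_inj.mp
    have h1 : pvF "" w = w := by simp [pvF]
    rw [List.foldl_cons, h1, pvF_fold_toList l w hw, pvS_toList w l hw hl]

theorem pvS_length (w : String) (l : List String)
    (hw : w ≠ "") (hl : ∀ u ∈ l, u ≠ "") :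
    (pvS (w :: l)).length = w.length + (pvPL l).length := by
  have := congrArg List.length (pvS_toList w l hw hl)
  simpa using this

-- every suffix join is at most as long as the full space-prefixed concatenation
theorem pvSL_len_bound (l : List String) (hl : ∀ u ∈ l, u ≠ "") :
    ∀ b ∈ pvSL l, b.length ≤ (pvPL l).length := by
  induction l with
  | nil => simp [pvSL]
  | cons w l ih =>
    have hw : w ≠ "" := hl w (by simp)
    have hl' : ∀ u ∈ l, u ≠ "" := fun u hu => hl u (by simp [hu])
    intro b hb
    rcases List.mem_cons.mp hb with hb | hb
    · rw [hb, pvS_length w l hw hl']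
      simp [pvPL]
    · have := ih hl' b hb
      simp [pvPL]; omega

-- the suffix joins have strictly decreasing lengths, hence are pairwise distinct
theorem pvSL_pairwise : ∀ (l : List String), (∀ u ∈ l, u ≠ "") →
    (pvSL l).Pairwise (fun a b => b.length < a.length)
  | [], _ => by simp [pvSL]
  | w :: l, h => by
    have hw : w ≠ "" := h w (by simp)
    have hl' : ∀ u ∈ l, u ≠ "" := fun u hu => h u (by simp [hu])
    refine List.Pairwise.cons ?_ (pvSL_pairwise l hl')
    intro b hb
    have hbnd := pvSL_len_bound l hl' b hb
    have hwpos : 0 < w.length := by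
      have : w.toList ≠ [] := fun h0 => hw (String.toList_eq_nil_iff.mp h0)
      have := List.length_pos_iff.mpr this
      simpa using this
    rw [pvS_length w l hw hl']
    omega

theorem pvSL_nodup (l : List String) (h : ∀ u ∈ l, u ≠ "") : (pvSL l).Nodup :=
  (pvSL_pairwise l h).imp (fun {a b} hlt hab => by rw [hab] at hlt; omega)

-- words produced by str.split() are never empty: invariant of split₀.go's accumulator
theorem pv_go_ne_nil : ∀ (s cur : List Char) (acc : List (List Char)),
    (∀ w ∈ acc, w ≠ []) → ∀ w ∈ PySem.Chars.split₀.go s cur acc, w ≠ []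
  | [], cur, acc, hacc => by
    unfold PySem.Chars.split₀.go
    split
    · intro w hw; exact hacc w (List.mem_reverse.mp hw)
    · rename_i hcur
      intro w hw
      rcases List.mem_cons.mp (List.mem_reverse.mp hw) with h | h
      · subst h
        simp only [List.isEmpty_iff] at hcur
        simpa using hcur
      · exact hacc w h
  | c :: rest, cur, acc, hacc => by
    unfold PySem.Chars.split₀.go
    split
    · split
      · exact pv_go_ne_nil rest [] acc hacc
      · rename_i hcur
        refine pv_go_ne_nil rest [] (cur.reverse :: acc) ?_
        intro w hw
        rcases List.mem_cons.mp hw with h | h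
        · subst h; simp only [List.isEmpty_iff] at hcur; simpa using hcur
        · exact hacc w h
    · exact pv_go_ne_nil rest (c :: cur) acc hacc

theorem pv_words_ne (s : String) : ∀ w ∈ PySem.Str.split₀ s, w ≠ "" := by
  intro w hw h
  have hmem : w.toList ∈ PySem.Chars.split₀ s.toList := by
    rw [← PySem.Str.split₀_map_toList]
    exact List.mem_map_of_mem hw
  refine pv_go_ne_nil s.toList [] [] (by simp) w.toList hmem ?_
  rw [h]; simp

-- A's dict step for one token
def pvAstep (e : List (String × String))
    (d : PySem.Dict String (List (List (String × String)))) (k : String) :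
    PySem.Dict String (List (List (String × String))) :=
  let d1 := if d.contains k then d else d.insert k []
  d1.insert k (d1.getD k [] ++ [e])

-- A's whole dict loop over fresh, distinct keys just appends singleton entries
theorem pvAfold (e : List (String × String)) :
    ∀ (ks : List String) (d : PySem.Dict String (List (List (String × String)))),
    d.keys.Nodup → ks.Nodup → (∀ k ∈ ks, d.contains k = false) →
    (ks.foldl (pvAstep e) d).items = d.items ++ ks.map (fun k => (k, [e]))
  | [], d, _, _, _ => by simp
  | k :: ks, d, hd, hnd, hf => by
    have hk : d.contains k = false := hf k (by simp)
    have hstep : pvAstep e d k = d.insert k [e] := by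
      unfold pvAstep
      dsimp only
      rw [if_neg (by simp [hk]), PySem.Dict.getD_insert_self, List.nil_append,
          PySem.Dict.insert_insert_self]
    have hknotin : k ∉ ks := (List.nodup_cons.mp hnd).1
    have hrec := pvAfold e ks (d.insert k [e])
      (PySem.Dict.nodup_keys_insert d k [e] hd) (List.nodup_cons.mp hnd).2
      (by
        intro k' hk'
        rw [PySem.Dict.contains_insert]
        have hne : k' ≠ k := fun hh => hknotin (hh ▸ hk')
        simp [hne, hf k' (by simp [hk'])])
    rw [List.foldl_cons, hstep, hrec,
        PySem.Dict.items_insert_of_not_contains d [e] hk]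
    simp

-- each outer index i contributes the suffix join of split[i:]
theorem pv_range_map (ws : List String) :
    (List.range ws.length).map (fun k => pvS (ws.drop k)) = pvSL ws := by
  induction ws with
  | nil => simp [pvSL]
  | cons w l ih =>
    simp only [List.length_cons, List.range_succ_eq_map, List.map_cons, List.map_map,
      List.drop_zero, Function.comp_def, List.drop_succ_cons]
    rw [ih]
    rfl

-- B's backward pass computes (full suffix join, all suffix joins shortest-first)
theorem pvB_st (ws : List String) :
    ws.reverse.foldl (fun (st : String × List String) word =>
      let suffix := if st.1 ≠ "" then word ++ " " ++ st.1 else word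
      (suffix, st.2 ++ [suffix])) ("", []) = (pvS ws, pvBL ws) := by
  rw [List.foldl_reverse]
  induction ws with
  | nil => rfl
  | cons w l ih => rw [List.foldr_cons, ih]; rfl

theorem pvBL_reverse (ws : List String) : (pvBL ws).reverse = pvSL ws := by
  induction ws with
  | nil => rfl
  | cons w l ih => simp [pvBL, pvSL, ih]

-- B's dict comprehension over the (distinct) suffix joins
theorem pvB_items (e : List (String × String)) (ks : List String) (hnd : ks.Nodup) :
    (ks.foldl (fun d s => d.insert s [e])
      (PySem.Dict.empty : PySem.Dict String (List (List (String × String))))).items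
      = ks.map (fun k => (k, [e])) := by
  have := PySem.Dict.items_foldl_insert_fresh ks (fun s => s) (fun _ => [e])
    (PySem.Dict.empty : PySem.Dict String (List (List (String × String))))
    (by intro a _; simp) (by simpa using hnd)
  simpa using this

-- A's result, in closed form
theorem pvA_closed (food_id food_name : String) :
    determine_tokens food_id food_name =
      (pvSL (PySem.Str.split₀ (PySem.Str.lower food_name))).map
        (fun k => (k, [[("hash", food_id), ("name", food_name)]])) := by
  unfold determine_tokens
  dsimp only
  have hne := pv_words_ne (PySem.Str.lower food_name)
  generalize hws : PySem.Str.split₀ (PySem.Str.lower food_name) = ws at hne ⊢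
  have hlen : PySem.List.len ws = (ws.length : ℤ) := rfl
  rw [hlen, PySem.List.pyRange_zero_natCast, List.foldl_map]
  have hbody : ∀ (d : PySem.Dict String (List (List (String × String)))) (k : ℕ),
      k ∈ List.range ws.length →
      (let food_token :=
        (PySem.List.pyRange (k : ℤ) ((ws.length : ℤ))).foldl
          (fun food_token j =>
            let food_token := if food_token ≠ "" then food_token ++ " " else food_token
            food_token ++ PySem.List.pyGetD ws j "") ""
       let food_tokens := if d.contains food_token then d else d.insert food_token []
       food_tokens.insert food_token
        (food_tokens.getD food_token [] ++ [[("hash", food_id), ("name", food_name)]]))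
      = pvAstep [("hash", food_id), ("name", food_name)] d (pvS (ws.drop k)) := by
    intro d k _
    have htok : (PySem.List.pyRange (k : ℤ) ((ws.length : ℤ))).foldl
        (fun food_token j =>
          let food_token := if food_token ≠ "" then food_token ++ " " else food_token
          food_token ++ PySem.List.pyGetD ws j "") ""
        = pvS (ws.drop k) := by
      have h1 : (PySem.List.pyRange (k : ℤ) (PySem.List.len ws)).foldl
          (fun acc j => pvF acc (PySem.List.pyGetD ws j "")) ""
          = (ws.drop ((k : ℤ)).toNat).foldl pvF "" :=
        PySem.List.foldl_pyRange_pyGetD ws "" pvF "" (Int.natCast_nonneg k)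
      have h2 : (PySem.List.pyRange (k : ℤ) ((ws.length : ℤ))).foldl
          (fun food_token j =>
            let food_token := if food_token ≠ "" then food_token ++ " " else food_token
            food_token ++ PySem.List.pyGetD ws j "") ""
          = (ws.drop ((k : ℤ)).toNat).foldl pvF "" := h1
      rw [h2]
      simp only [Int.toNat_natCast]
      exact pvJ_eq_pvS (ws.drop k) (fun u hu => hne u (List.mem_of_mem_drop hu))
    dsimp only
    rw [htok]
    rfl
  rw [List.foldl_ext _ _ _ hbody]
  have hfold : (List.range ws.length).foldl
      (fun d k => pvAstep [("hash", food_id), ("name", food_name)] d (pvS (ws.drop k)))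
      (PySem.Dict.empty : PySem.Dict String (List (List (String × String))))
      = ((List.range ws.length).map (fun k => pvS (ws.drop k))).foldl
          (pvAstep [("hash", food_id), ("name", food_name)])
          (PySem.Dict.empty : PySem.Dict String (List (List (String × String)))) := by
    rw [List.foldl_map]
  rw [hfold, pv_range_map ws,
      pvAfold _ (pvSL ws) _ PySem.Dict.nodup_keys_empty (pvSL_nodup ws hne)
        (by intro k _; simp)]
  rfl

-- B's result, in the same closed form
theorem pvB_closed (food_id food_name : String) :
    determine_tokens_alt food_id food_name =
      (pvSL (PySem.Str.split₀ (PySem.Str.lower food_name))).map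
        (fun k => (k, [[("hash", food_id), ("name", food_name)]])) := by
  unfold determine_tokens_alt
  dsimp only
  have hne := pv_words_ne (PySem.Str.lower food_name)
  generalize hws : PySem.Str.split₀ (PySem.Str.lower food_name) = ws at hne ⊢
  rw [pvB_st ws]
  show ((pvBL ws).reverse.foldl
      (fun d s => d.insert s [[("hash", food_id), ("name", food_name)]])
      (PySem.Dict.empty : PySem.Dict String (List (List (String × String))))).items = _
  rw [pvBL_reverse ws, pvB_items _ (pvSL ws) (pvSL_nodup ws hne)]

-- ===== VERDICT (by name: the statement is the Claim_ definition above) =====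
theorem determine_tokens_spec : Claim_equal_determine_tokens := by
  intro food_id food_name _
  unfold Spec_determine_tokens
  rw [pvA_closed, pvB_closed]
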